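-- pv_equiv track=rewrite | github.com/LSeaburg/AOC_2024 | 19/day-19.py | get_num_of_arrangements
-- ===== SOURCE A (Python) =====
-- def get_num_of_arrangements(pattern, towels, arrangements, segs, seen):
--   if pattern == "":
--     return 1
--   if pattern in seen:
--     return seen[pattern]
--   for towel in towels:
--     if towel == pattern[:len(towel)]:
--       new_arrangements = get_num_of_arrangements(pattern[len(towel):], towels, 0, segs + [towel], seen)
--       arrangements = arrangements + new_arrangements
--       seen.update({pattern: arrangements})
--   return arrangements
-- ===== SOURCE B (Python) =====
-- def get_num_of_arrangements(pattern, towels, arrangements, segs, seen):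
--     if pattern == "":
--         return 1
--     if pattern in seen:
--         return seen[pattern]
--     n = len(pattern)
--     dp = [0] * (n + 1)
--     dp[n] = 1
--     i = n - 1
--     while i >= 0:
--         suf = pattern[i:]
--         if suf in seen:
--             dp[i] = seen[suf]
--         else:
--             total = 0
--             for t in towels:
--                 if suf.startswith(t):
--                     total += dp[i + len(t)]
--             dp[i] = total
--         i -= 1
--     return arrangements + dp[0]
-- ===== Notes on version B (the rewrite author's own statement) =====
-- stated objective: alternative
-- what changed: Replaces A's top-down recursion with a mutated memo dict by an iterative bottom-up DP over suffix positions (dp[i] = ways to tile pattern[i:], consulting the given seen entries), leaving the caller's seen dict untouched.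
-- outside the precondition, e.g. on get_num_of_arrangements('a', [''], 0, [], {}): A raises RecursionError, B returns 0; on get_num_of_arrangements('a', ['a', ''], 0, [], {}): A returns 2, B returns 1
import Mathlib
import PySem

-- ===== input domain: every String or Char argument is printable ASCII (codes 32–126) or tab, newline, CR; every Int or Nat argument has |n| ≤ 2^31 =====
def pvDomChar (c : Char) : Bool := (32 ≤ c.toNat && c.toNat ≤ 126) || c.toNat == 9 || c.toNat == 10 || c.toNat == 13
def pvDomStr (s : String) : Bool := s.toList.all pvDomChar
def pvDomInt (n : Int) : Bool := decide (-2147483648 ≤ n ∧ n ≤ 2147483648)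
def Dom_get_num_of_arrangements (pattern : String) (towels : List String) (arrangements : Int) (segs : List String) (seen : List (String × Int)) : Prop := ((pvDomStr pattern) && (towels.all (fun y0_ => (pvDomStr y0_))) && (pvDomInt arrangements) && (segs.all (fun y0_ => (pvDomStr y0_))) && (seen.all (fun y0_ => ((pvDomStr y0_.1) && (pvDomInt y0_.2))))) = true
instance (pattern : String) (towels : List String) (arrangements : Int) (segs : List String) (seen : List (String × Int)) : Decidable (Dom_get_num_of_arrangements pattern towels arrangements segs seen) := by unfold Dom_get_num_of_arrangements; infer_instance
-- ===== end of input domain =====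

-- B replaces A's top-down memoized recursion by a bottom-up DP table over suffix positions
-- (objective: alternative).  Python A mutates the caller's `seen` dict in place and B does not:
-- the equivalence proved here is about the RETURN value only.

-- ===== PORT A =====
-- The recursion on `fuel` (= |pattern|+1 at the top call) is only a totality guard: with no
-- empty towel every recursive call strictly shortens the pattern, so the 0-fuel branch is
-- never reached on inputs satisfying Pre_.  The pair threads Python's mutable `seen` dict.
def pyAGo (towels : List String) : Nat → List Char → Int → List String → PySem.Dict String Int → Int × PySem.Dict String Int
  | 0, _, arrangements, _, seen => (arrangements, seen)
  | fuel+1, pattern, arrangements, segs, seen =>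
    if pattern = [] then (1, seen)
    else
      match seen.get? (String.ofList pattern) with
      | some v => (v, seen)
      | none =>
        towels.foldl (fun st towel =>
          if towel.toList = PySem.Chars.slice pattern none (some (PySem.Str.len towel)) then
            let r := pyAGo towels fuel (PySem.Chars.slice pattern (some (PySem.Str.len towel)) none) 0 (segs ++ [towel]) st.2
            (st.1 + r.1, r.2.insert (String.ofList pattern) (st.1 + r.1))
          else st) (arrangements, seen)

def get_num_of_arrangements (pattern : String) (towels : List String) (arrangements : Int) (segs : List String) (seen : List (String × Int)) : Int :=
  (pyAGo towels (pattern.toList.length + 1) pattern.toList arrangements segs (PySem.Dict.ofList seen)).1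

-- ===== PORT B =====
-- Source B's while-loop: i runs n-1, n-2, …, 0; the counter k is i+1 (k = 0 stops the loop).
def pyBLoop (patternL : List Char) (towels : List String) (seen : PySem.Dict String Int) : Nat → List Int → List Int
  | 0, dp => dp
  | k+1, dp =>
    let suf := PySem.Chars.slice patternL (some ((k : Nat) : Int)) none   -- pattern[i:]
    let v : Int :=
      match seen.get? (String.ofList suf) with
      | some w => w
      | none =>
        -- dp[i+len(t)] is in range whenever suf.startswith(t), so getD reads what Python reads
        towels.foldl (fun total t =>
          if PySem.Chars.startswith suf t.toList then total + dp.getD (k + t.toList.length) 0 else total) 0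
    pyBLoop patternL towels seen k (dp.set k v)

def get_num_of_arrangements_alt (pattern : String) (towels : List String) (arrangements : Int) (segs : List String) (seen : List (String × Int)) : Int :=
  let d := PySem.Dict.ofList seen
  if pattern.toList = [] then 1
  else
    match d.get? pattern with
    | some v => v
    | none =>
      let n := pattern.toList.length
      let dp := pyBLoop pattern.toList towels d n ((List.replicate (n+1) (0 : Int)).set n 1)
      arrangements + dp.getD 0 0

-- ===== PRECONDITION & SPEC =====
-- Pre_ excludes inputs where towels contains the empty string while the pattern is nonempty and
-- not already a key of seen: there Python A either recurses forever (RecursionError) or returns a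
-- double-counted value through its own partially-filled memo entries.
def Pre_get_num_of_arrangements (pattern : String) (towels : List String) (arrangements : Int) (segs : List String) (seen : List (String × Int)) : Prop :=
  ¬("" ∈ towels ∧ pattern ≠ "" ∧ pattern ∉ seen.map Prod.fst)
instance (pattern : String) (towels : List String) (arrangements : Int) (segs : List String) (seen : List (String × Int)) : Decidable (Pre_get_num_of_arrangements pattern towels arrangements segs seen) := by unfold Pre_get_num_of_arrangements; infer_instance
def pvWitness_get_num_of_arrangements : String × List String × Int × List String × (List (String × Int)) :=
  ("ab", ["a", "b", "ab"], 0, [], [("b", 1)])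

def Spec_get_num_of_arrangements (pattern : String) (towels : List String) (arrangements : Int) (segs : List String) (seen : List (String × Int)) (out : Int) : Prop := out = get_num_of_arrangements_alt pattern towels arrangements segs seen
instance (pattern : String) (towels : List String) (arrangements : Int) (segs : List String) (seen : List (String × Int)) (out : Int) : Decidable (Spec_get_num_of_arrangements pattern towels arrangements segs seen out) := by unfold Spec_get_num_of_arrangements; infer_instance

-- ===== CLAIM (what is proved, stated in full; the proofs are below) =====
def Claim_equal_get_num_of_arrangements : Prop := ∀ (pattern : String) (towels : List String) (arrangements : Int) (segs : List String) (seen : List (String × Int)), Dom_get_num_of_arrangements pattern towels arrangements segs seen → Pre_get_num_of_arrangements pattern towels arrangements segs seen → Spec_get_num_of_arrangements pattern towels arrangements segs seen (get_num_of_arrangements pattern towels arrangements segs seen)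

-- ===== LEMMAS AND PROOFS =====

-- The common specification value: number of decompositions of p into towels, with lookups in
-- the ORIGINAL dict d0 short-circuiting (exactly A's recurrence read over the initial memo).
def fcount (towels : List String) (d0 : PySem.Dict String Int) : Nat → List Char → Int
  | 0, _ => 0
  | fuel+1, p =>
    if p = [] then 1
    else
      match d0.get? (String.ofList p) with
      | some v => v
      | none => (towels.map (fun t => if t.toList <+: p then fcount towels d0 fuel (p.drop t.toList.length) else 0)).sum

def fval (towels : List String) (d0 : PySem.Dict String Int) (p : List Char) : Int :=
  fcount towels d0 (p.length + 1) p

-- every entry of d whose key has length ≤ m carries its fcount value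
def GoodD (towels : List String) (d0 : PySem.Dict String Int) (m : Nat) (d : PySem.Dict String Int) : Prop :=
  ∀ q v, d.get? q = some v → q.toList ≠ [] → q.toList.length ≤ m → v = fval towels d0 q.toList

-- d's key set contains d0's
def SupD (d0 d : PySem.Dict String Int) : Prop :=
  ∀ q, (d0.get? q).isSome → (d.get? q).isSome

lemma condA_iff (t : String) (p : List Char) :
    (t.toList = PySem.Chars.slice p none (some (PySem.Str.len t))) ↔ t.toList <+: p := by
  rw [show PySem.Str.len t = ((t.toList.length : Int)) from by simp]
  rw [show PySem.Chars.slice p none (some ((t.toList.length : Int))) = p.take t.toList.length from by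
    simp [PySem.List.slice_to]]
  exact (List.prefix_iff_eq_take).symm

lemma subA_eq (t : String) (p : List Char) :
    PySem.Chars.slice p (some (PySem.Str.len t)) none = p.drop t.toList.length := by
  rw [show PySem.Str.len t = ((t.toList.length : Int)) from by simp]
  simp [PySem.List.slice_from]

lemma fcount_congr (towels : List String) (d0 : PySem.Dict String Int)
    (hT : ∀ t ∈ towels, t.toList ≠ []) :
    ∀ f1, ∀ p : List Char, p.length < f1 → ∀ f2, p.length < f2 →
      fcount towels d0 f1 p = fcount towels d0 f2 p := by
  intro f1
  induction f1 with
  | zero => intro p hp; omega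
  | succ f ih =>
    intro p hp f2 h2
    obtain ⟨f2', rfl⟩ : ∃ m, f2 = m + 1 := ⟨f2 - 1, by omega⟩
    simp only [fcount]
    by_cases hpe : p = []
    · simp [hpe]
    · simp only [hpe, if_false]
      cases hd0 : d0.get? (String.ofList p) with
      | some v => rfl
      | none =>
        show (towels.map (fun t => if t.toList <+: p then fcount towels d0 f (List.drop t.toList.length p) else 0)).sum
            = (towels.map (fun t => if t.toList <+: p then fcount towels d0 f2' (List.drop t.toList.length p) else 0)).sum
        congr 1
        apply List.map_congr_left
        intro t ht
        by_cases hpre : t.toList <+: p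
        · simp only [hpre, if_true]
          have h1 : 1 ≤ t.toList.length := List.length_pos_iff.mpr (hT t ht)
          have hplen : 1 ≤ p.length := List.length_pos_iff.mpr hpe
          have hdl : (p.drop t.toList.length).length = p.length - t.toList.length := by
            simp
          exact ih _ (by omega) _ (by omega)
        · simp [hpre]

lemma goodD_mono (towels : List String) (d0 : PySem.Dict String Int) {m m' : Nat} (h : m' ≤ m)
    {d : PySem.Dict String Int} (hg : GoodD towels d0 m d) : GoodD towels d0 m' d := by
  intro q v h1 h2 h3; exact hg q v h1 h2 (le_trans h3 h)

lemma fval_nil (towels : List String) (d0 : PySem.Dict String Int) : fval towels d0 [] = 1 := by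
  simp [fval, fcount]

-- the sum over towels of fval of the suffixes IS fval p, when p is not memoized in d0
lemma sum_eq_fval (towels : List String) (d0 : PySem.Dict String Int)
    (hT : ∀ t ∈ towels, t.toList ≠ []) (p : List Char) (hp : p ≠ [])
    (hd0 : d0.get? (String.ofList p) = none) :
    (towels.map (fun t => if t.toList <+: p then fval towels d0 (p.drop t.toList.length) else 0)).sum
      = fval towels d0 p := by
  conv_rhs => rw [fval]
  obtain ⟨m, hm⟩ : ∃ m, p.length + 1 = m + 1 := ⟨p.length, rfl⟩
  rw [hm, fcount]
  simp only [hp, if_false, hd0]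
  show _ = (towels.map (fun t => if t.toList <+: p then fcount towels d0 m (List.drop t.toList.length p) else 0)).sum
  congr 1
  apply List.map_congr_left
  intro t ht
  by_cases hpre : t.toList <+: p
  · simp only [hpre, if_true]
    have h1 : 1 ≤ t.toList.length := List.length_pos_iff.mpr (hT t ht)
    have hplen : 1 ≤ p.length := List.length_pos_iff.mpr hp
    have hdl : (p.drop t.toList.length).length = p.length - t.toList.length := by simp
    exact fcount_congr towels d0 hT _ _ (by omega) _ (by omega)
  · simp [hpre]

-- the inner towel loop of A, with the induction hypothesis over shorter patterns as input:
-- it adds the decomposition counts of the matching suffixes, only touches keys no longer than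
-- p (the key p itself always holding the running accumulator), and stores fcount values
lemma foldA (towels : List String) (d0 : PySem.Dict String Int)
    (hT : ∀ t ∈ towels, t.toList ≠ []) (fuel : Nat) (p : List Char) (hp : p ≠ [])
    (hfl : p.length ≤ fuel)
    (IH : ∀ (p' : List Char) (arr : Int) (segs : List String) (d : PySem.Dict String Int),
        p'.length < fuel → GoodD towels d0 p'.length d → SupD d0 d →
        ((pyAGo towels fuel p' arr segs d).1 =
            (if p' = [] then 1 else
              match d.get? (String.ofList p') with
              | some v => v
              | none => arr + fval towels d0 p'))
        ∧ (∀ q v, d.get? q = some v → (pyAGo towels fuel p' arr segs d).2.get? q = some v)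
        ∧ (∀ q v, (pyAGo towels fuel p' arr segs d).2.get? q = some v →
              d.get? q = some v ∨
              (q.toList ≠ [] ∧ (q.toList.length < p'.length ∧ v = fval towels d0 q.toList
                ∨ q = String.ofList p' ∧ v = arr + fval towels d0 p')))) :
    ∀ (ts : List String), (∀ t ∈ ts, t ∈ towels) → ∀ (a : Int) (segs : List String) (d : PySem.Dict String Int),
      GoodD towels d0 (p.length - 1) d → SupD d0 d →
      (let F := ts.foldl (fun st towel =>
          if towel.toList = PySem.Chars.slice p none (some (PySem.Str.len towel)) then
            let r := pyAGo towels fuel (PySem.Chars.slice p (some (PySem.Str.len towel)) none) 0 (segs ++ [towel]) st.2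
            (st.1 + r.1, r.2.insert (String.ofList p) (st.1 + r.1))
          else st) (a, d);
        F.1 = a + (ts.map (fun t => if t.toList <+: p then fval towels d0 (p.drop t.toList.length) else 0)).sum
        ∧ (F.2.get? (String.ofList p) = d.get? (String.ofList p) ∧ F.1 = a
            ∨ F.2.get? (String.ofList p) = some F.1)
        ∧ (∀ q v, q ≠ String.ofList p → d.get? q = some v → F.2.get? q = some v)
        ∧ (∀ q v, q ≠ String.ofList p → F.2.get? q = some v →
              d.get? q = some v ∨ (q.toList ≠ [] ∧ q.toList.length < p.length ∧ v = fval towels d0 q.toList))) := by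
  intro ts
  induction ts with
  | nil =>
    intro _ a segs d hgood hsup
    refine ⟨by simp, Or.inl ⟨rfl, rfl⟩, fun q v _ h => h, fun q v _ h => Or.inl h⟩
  | cons t ts ihts =>
    intro hmem a segs d hgood hsup
    have htT : t ∈ towels := hmem t (List.mem_cons_self)
    have h1 : 1 ≤ t.toList.length := List.length_pos_iff.mpr (hT t htT)
    have hplen : 1 ≤ p.length := List.length_pos_iff.mpr hp
    simp only [List.foldl_cons]
    by_cases hpre : t.toList <+: p
    · rw [if_pos ((condA_iff t p).mpr hpre), subA_eq]
      set sub := p.drop t.toList.length with hsub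
      have hsublen : sub.length = p.length - t.toList.length := by simp [hsub]
      have hsubfl : sub.length < fuel := by omega
      have hsubgood : GoodD towels d0 sub.length d :=
        goodD_mono towels d0 (by omega) hgood
      obtain ⟨hA1, hA2, hA3⟩ := IH sub 0 (segs ++ [t]) d hsubfl hsubgood hsup
      set R := pyAGo towels fuel sub 0 (segs ++ [t]) d with hR
      have hRval : R.1 = fval towels d0 sub := by
        rw [hA1]
        by_cases hse : sub = []
        · simp [hse, fval_nil]
        · simp only [hse, if_false]
          cases hd : d.get? (String.ofList sub) with
          | some w =>
            have := hgood (String.ofList sub) w hd (by simpa using hse)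
              (by simp [String.toList_ofList]; omega)
            simpa [String.toList_ofList] using this
          | none => simp
      have hRsup : SupD d0 R.2 := by
        intro q hq
        obtain ⟨v, hv⟩ := Option.isSome_iff_exists.mp (hsup q hq)
        exact Option.isSome_iff_exists.mpr ⟨v, hA2 q v hv⟩
      have hRnew : ∀ q v, R.2.get? q = some v →
          d.get? q = some v ∨ (q.toList ≠ [] ∧ q.toList.length < p.length ∧ v = fval towels d0 q.toList) := by
        intro q v hv
        rcases hA3 q v hv with h | ⟨hne, h⟩
        · exact Or.inl h
        · refine Or.inr ⟨hne, ?_⟩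
          rcases h with ⟨hlt, hval⟩ | ⟨rfl, hval⟩
          · exact ⟨by omega, hval⟩
          · refine ⟨by simp [String.toList_ofList]; omega, by simpa using hval⟩
      set d' := R.2.insert (String.ofList p) (a + R.1) with hd'
      have hPnotshort : ¬ ((String.ofList p).toList.length ≤ p.length - 1) := by
        simp [String.toList_ofList]; omega
      have hgood' : GoodD towels d0 (p.length - 1) d' := by
        intro q v hv hq hql
        by_cases hqP : q = String.ofList p
        · exact absurd hql (by subst hqP; exact hPnotshort)
        · rw [hd', PySem.Dict.get?_insert_of_ne _ _ hqP] at hv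
          rcases hRnew q v hv with h | ⟨_, _, hval⟩
          · exact hgood q v h hq hql
          · exact hval
      have hsup' : SupD d0 d' := by
        intro q hq
        by_cases hqP : q = String.ofList p
        · subst hqP; simp [hd', PySem.Dict.get?_insert_self]
        · rw [hd', PySem.Dict.get?_insert_of_ne _ _ hqP]
          exact hRsup q hq
      obtain ⟨g1, g2, g3, g4⟩ := ihts (fun x hx => hmem x (List.mem_cons_of_mem t hx)) (a + R.1) segs d' hgood' hsup'
      set F := ts.foldl _ (a + R.1, d') with hF
      refine ⟨?_, ?_, ?_, ?_⟩
      · rw [g1, hRval]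
        simp only [List.map_cons, List.sum_cons, hpre, if_true]
        ring
      · right
        rcases g2 with ⟨hP, hFa⟩ | hP
        · rw [hP, hFa, hd', PySem.Dict.get?_insert_self]
        · exact hP
      · intro q v hq hv
        exact g3 q v hq (by rw [hd', PySem.Dict.get?_insert_of_ne _ _ hq]; exact hA2 q v hv)
      · intro q v hq hv
        rcases g4 q v hq hv with h | h
        · rw [hd', PySem.Dict.get?_insert_of_ne _ _ hq] at h
          exact hRnew q v h
        · exact Or.inr h
    · rw [if_neg (fun h => hpre ((condA_iff t p).mp h))]
      obtain ⟨g1, g2, g3, g4⟩ := ihts (fun x hx => hmem x (List.mem_cons_of_mem t hx)) a segs d hgood hsup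
      refine ⟨?_, g2, g3, g4⟩
      rw [g1]
      simp [hpre]

-- A's recursion computes arr + fcount, extends the memo, and only stores fcount values
lemma pyAGo_spec (towels : List String) (d0 : PySem.Dict String Int)
    (hT : ∀ t ∈ towels, t.toList ≠ []) :
    ∀ fuel (p : List Char) (arr : Int) (segs : List String) (d : PySem.Dict String Int),
      p.length < fuel → GoodD towels d0 p.length d → SupD d0 d →
      ((pyAGo towels fuel p arr segs d).1 =
          (if p = [] then 1 else
            match d.get? (String.ofList p) with
            | some v => v
            | none => arr + fval towels d0 p))
      ∧ (∀ q v, d.get? q = some v → (pyAGo towels fuel p arr segs d).2.get? q = some v)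
      ∧ (∀ q v, (pyAGo towels fuel p arr segs d).2.get? q = some v →
            d.get? q = some v ∨
            (q.toList ≠ [] ∧ (q.toList.length < p.length ∧ v = fval towels d0 q.toList
              ∨ q = String.ofList p ∧ v = arr + fval towels d0 p))) := by
  intro fuel
  induction fuel with
  | zero => intro p arr segs d h; omega
  | succ fuel ih =>
    intro p arr segs d hlen hgood hsup
    by_cases hpe : p = []
    · subst hpe
      refine ⟨by simp [pyAGo], fun q v h => by simpa [pyAGo] using h,
        fun q v h => Or.inl (by simpa [pyAGo] using h)⟩
    · cases hd : d.get? (String.ofList p) with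
      | some v =>
        have hgo : pyAGo towels (fuel+1) p arr segs d = (v, d) := by
          simp only [pyAGo, if_neg hpe, hd]
        rw [hgo]
        exact ⟨by simp [hpe], fun q v h => h, fun q v h => Or.inl h⟩
      | none =>
        have hstep := foldA towels d0 hT fuel p hpe (by omega) ih towels (fun t h => h)
          arr segs d (goodD_mono towels d0 (by omega) hgood) hsup
        obtain ⟨g1, g2, g3, g4⟩ := hstep
        have hd0p : d0.get? (String.ofList p) = none := by
          cases hd0 : d0.get? (String.ofList p) with
          | none => rfl
          | some w =>
            have := hsup (String.ofList p) (by simp [hd0])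
            rw [hd] at this; simp at this
        have hsum := sum_eq_fval towels d0 hT p hpe hd0p
        have hgo : pyAGo towels (fuel+1) p arr segs d
            = towels.foldl (fun st towel =>
                if towel.toList = PySem.Chars.slice p none (some (PySem.Str.len towel)) then
                  let r := pyAGo towels fuel (PySem.Chars.slice p (some (PySem.Str.len towel)) none) 0 (segs ++ [towel]) st.2
                  (st.1 + r.1, r.2.insert (String.ofList p) (st.1 + r.1))
                else st) (arr, d) := by
          simp only [pyAGo, if_neg hpe, hd]
        rw [hgo] at *
        refine ⟨by rw [g1, hsum]; simp [hpe], ?_, ?_⟩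
        · intro q v hv
          have hq : q ≠ String.ofList p := by
            intro h; subst h; rw [hd] at hv; simp at hv
          exact g3 q v hq hv
        · intro q v hv
          by_cases hq : q = String.ofList p
          · subst hq
            rcases g2 with ⟨hP, _⟩ | hP
            · rw [hP, hd] at hv; simp at hv
            · rw [hP] at hv
              have : v = _ := (Option.some_inj.mp hv.symm)
              right
              refine ⟨by simp [String.toList_ofList, hpe], Or.inr ⟨rfl, ?_⟩⟩
              rw [this, g1, hsum]
          · rcases g4 q v hq hv with h | ⟨h1, h2, h3⟩
            · exact Or.inl h
            · exact Or.inr ⟨h1, Or.inl ⟨h2, h3⟩⟩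

lemma sufB_eq (pl : List Char) (k : Nat) :
    PySem.Chars.slice pl (some ((k : Nat) : Int)) none = pl.drop k := by
  simp [PySem.List.slice_from]

lemma foldl_if_add {α : Type} (l : List α) (c : α → Bool) (g : α → Int) (x : Int) :
    l.foldl (fun a t => if c t then a + g t else a) x
      = x + (l.map (fun t => if c t then g t else 0)).sum := by
  have : (fun (a : Int) t => if c t then a + g t else a)
      = fun a t => a + (if c t then g t else 0) := by
    funext a t; split <;> simp
  rw [this, PySem.List.foldl_add]

-- B's dp table holds fcount of every suffix from position k upward
lemma pyBLoop_spec (towels : List String) (d0 : PySem.Dict String Int)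
    (hT : ∀ t ∈ towels, t.toList ≠ []) (pl : List Char) :
    ∀ (k : Nat) (dp : List Int), dp.length = pl.length + 1 → k ≤ pl.length →
      (∀ j, k ≤ j → j ≤ pl.length → dp.getD j 0 = fval towels d0 (pl.drop j)) →
      ∀ j, j ≤ pl.length → (pyBLoop pl towels d0 k dp).getD j 0 = fval towels d0 (pl.drop j) := by
  intro k
  induction k with
  | zero =>
    intro dp _ _ hinv j hj
    simpa [pyBLoop] using hinv j (Nat.zero_le j) hj
  | succ k ih =>
    intro dp hdl hk hinv
    simp only [pyBLoop, sufB_eq]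
    set suf := pl.drop k with hsuf
    have hsuflen : suf.length = pl.length - k := by simp [hsuf]
    have hsufne : suf ≠ [] := by
      intro h; have := congrArg List.length h; simp [hsuflen] at this; omega
    set v : Int :=
      match d0.get? (String.ofList suf) with
      | some w => w
      | none =>
        towels.foldl (fun total t =>
          if PySem.Chars.startswith suf t.toList then total + dp.getD (k + t.toList.length) 0 else total) 0
      with hv
    have hvval : v = fval towels d0 suf := by
      rw [hv]
      cases hd : d0.get? (String.ofList suf) with
      | some w =>
        obtain ⟨m, hm⟩ : ∃ m, suf.length + 1 = m + 1 := ⟨suf.length, rfl⟩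
        rw [fval, hm, fcount]
        simp [hsufne, hd]
      | none =>
        show towels.foldl (fun total t =>
            if PySem.Chars.startswith suf t.toList = true then total + dp.getD (k + t.toList.length) 0 else total) 0
          = fval towels d0 suf
        rw [foldl_if_add, zero_add, ← sum_eq_fval towels d0 hT suf hsufne hd]
        congr 1
        apply List.map_congr_left
        intro t ht
        by_cases hpre : t.toList <+: suf
        · rw [if_pos ((PySem.Chars.startswith_iff suf t.toList).mpr hpre),
            if_pos hpre]
          have h1 : 1 ≤ t.toList.length := List.length_pos_iff.mpr (hT t ht)
          have h2 : t.toList.length ≤ suf.length := List.IsPrefix.length_le hpre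
          have hdd : List.drop t.toList.length suf = List.drop (k + t.toList.length) pl := by
            rw [hsuf, List.drop_drop]
          rw [hdd]
          exact hinv (k + t.toList.length) (by omega) (by omega)
        · rw [if_neg (fun h => hpre ((PySem.Chars.startswith_iff suf t.toList).mp h)), if_neg hpre]
    have hinv' : ∀ j, k ≤ j → j ≤ pl.length → (dp.set k v).getD j 0 = fval towels d0 (pl.drop j) := by
      intro j hj1 hj2
      by_cases hjk : j = k
      · subst hjk
        have hlt : j < dp.length := by omega
        show (dp.set j v)[j]?.getD 0 = _
        rw [List.getElem?_set_self hlt]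
        simpa [hsuf] using hvval
      · show (dp.set k v)[j]?.getD 0 = _
        rw [List.getElem?_set_ne (by omega)]
        exact hinv j (by omega) hj2
    exact ih (dp.set k v) (by simp [hdl]) (by omega) hinv'

lemma mem_fst_get?_ofList (seen : List (String × Int)) (p : String) (h : p ∈ seen.map Prod.fst) :
    ∃ v, (PySem.Dict.ofList seen).get? p = some v := by
  have key : ∀ (l : List (String × Int)) (d : PySem.Dict String Int),
      (p ∈ l.map Prod.fst ∨ (d.get? p).isSome) →
      ((l.foldl (fun d p => d.insert p.1 p.2) d).get? p).isSome := by
    intro l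
    induction l with
    | nil => intro d h; simpa using h.resolve_left (by simp)
    | cons e rest ih =>
      intro d h
      simp only [List.foldl_cons]
      apply ih
      by_cases hpe : p = e.1
      · subst hpe; right; simp [PySem.Dict.get?_insert_self]
      · rcases h with h | h
        · rcases (by simpa using h : p = e.1 ∨ p ∈ rest.map Prod.fst) with h' | h'
          · exact absurd h' hpe
          · exact Or.inl h'
        · right; rwa [PySem.Dict.get?_insert_of_ne _ _ hpe]
  exact Option.isSome_iff_exists.mp (key seen PySem.Dict.empty (Or.inl h))

theorem top_eq (pattern : String) (towels : List String) (arrangements : Int) (segs : List String) (seen : List (String × Int))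
    (hpre : ¬("" ∈ towels ∧ pattern ≠ "" ∧ pattern ∉ seen.map Prod.fst)) :
    get_num_of_arrangements pattern towels arrangements segs seen
      = get_num_of_arrangements_alt pattern towels arrangements segs seen := by
  set d := PySem.Dict.ofList seen with hd'
  set pl := pattern.toList with hpl
  by_cases hple : pl = []
  · simp only [get_num_of_arrangements, get_num_of_arrangements_alt, ← hpl, ← hd', hple]
    simp [pyAGo]
  · have hofl : String.ofList pl = pattern := by rw [hpl, String.ofList_toList]
    have hpat : pattern ≠ "" := by
      intro h
      exact hple (by rw [hpl, h]; rfl)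
    by_cases hmem : pattern ∈ seen.map Prod.fst
    -- pattern already memoized: both sides return the stored value immediately
    · obtain ⟨v, hv⟩ := mem_fst_get?_ofList seen pattern hmem
      rw [← hd'] at hv
      simp only [get_num_of_arrangements, get_num_of_arrangements_alt, ← hpl, ← hd']
      rw [if_neg hple]
      rw [show pyAGo towels (pl.length + 1) pl arrangements segs d = (v, d) from by
        simp only [pyAGo]; rw [if_neg hple, hofl, hv]]
      rw [hv]
    -- otherwise Pre_ guarantees no empty towel, and the DP/memo argument applies
    · have hnotin : "" ∉ towels := fun hin => hpre ⟨hin, hpat, hmem⟩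
      have hT : ∀ t ∈ towels, t.toList ≠ [] := by
        intro t ht h
        have : t = "" := by
          have := congrArg String.ofList h
          rwa [String.ofList_toList] at this
        exact hnotin (this ▸ ht)
      have hgood : ∀ m, GoodD towels d m d := by
        intro m q v hv hq _
        have hv' : d.get? (String.ofList q.toList) = some v := by
          rwa [String.ofList_toList]
        rw [fval]
        obtain ⟨m', hm⟩ : ∃ m', q.toList.length + 1 = m' + 1 := ⟨q.toList.length, rfl⟩
        rw [hm, fcount]
        simp [hq, hv]
      have hsup : SupD d d := fun q h => h
      have hmain := (pyAGo_spec towels d hT (pl.length + 1) pl arrangements segs d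
        (by omega) (hgood _) hsup).1
      simp only [get_num_of_arrangements, get_num_of_arrangements_alt, ← hpl, ← hd']
      rw [hmain, if_neg hple, hofl, if_neg hple]
      cases hdp : d.get? pattern with
      | some v => rfl
      | none =>
        have hn1 : ((List.replicate (pl.length + 1) (0 : Int)).set pl.length 1).length = pl.length + 1 := by
          simp
        have hinv0 : ∀ j, pl.length ≤ j → j ≤ pl.length →
            ((List.replicate (pl.length + 1) (0 : Int)).set pl.length 1).getD j 0
              = fval towels d (pl.drop j) := by
          intro j h1 h2
          have hj : j = pl.length := by omega
          subst hj
          show ((List.replicate (pl.length + 1) (0 : Int)).set pl.length 1)[pl.length]?.getD 0 = _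
          rw [List.getElem?_set_self (by simp)]
          simp [List.drop_length, fval_nil]
        have hB := pyBLoop_spec towels d hT pl pl.length _ hn1 (le_refl _) hinv0 0 (Nat.zero_le _)
        rw [hB]
        simp

-- ===== VERDICT (by name: the statement is the Claim_ definition above) =====
theorem get_num_of_arrangements_spec : Claim_equal_get_num_of_arrangements := by
  intro pattern towels arrangements segs seen _ hpre
  exact top_eq pattern towels arrangements segs seen hpre
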